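-- pv_equiv track=rewrite | github.com/8804who/python_practice | 프로그래머스/프로그래머스 숫자 게임.py | solution
-- ===== SOURCE A (Python) =====
-- def solution(A, B):
--     answer = 0
--     A.sort()
--     B.sort()
--     totalGame=len(A)
--     idx=0
--     for s1 in A:
--         while idx < totalGame:
--             if B[idx]>s1:
--                 answer+=1
--                 idx+=1
--                 break
--             else:
--                 idx+=1
--     return answer
-- ===== SOURCE B (Python) =====
-- def solution(A, B):
--     A.sort()
--     B.sort()
--     # one merged event stream: 2*v encodes a B-element, 2*v+1 an A-element,
--     # so at equal values the B-event sorts first (strict beat) —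
--     # like A, only the len(A) smallest elements of B take part
--     events = [2 * v for v in B[:len(A)]] + [2 * v + 1 for v in A]
--     events.sort()
--     available = 0
--     answer = 0
--     for e in events:
--         if e % 2 == 1:
--             available += 1
--         elif available > 0:
--             available -= 1
--             answer += 1
--     return answer
-- ===== Notes on version B (the rewrite author's own statement) =====
-- stated objective: alternative
-- what changed: Replaced A's per-A-element index scan through B with a single sweep over one merged sorted event stream (each B-value encoded 2v, each A-value 2v+1 so B-events precede A-events at ties) maintaining an available-unmatched-A counter.
import Mathlib
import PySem

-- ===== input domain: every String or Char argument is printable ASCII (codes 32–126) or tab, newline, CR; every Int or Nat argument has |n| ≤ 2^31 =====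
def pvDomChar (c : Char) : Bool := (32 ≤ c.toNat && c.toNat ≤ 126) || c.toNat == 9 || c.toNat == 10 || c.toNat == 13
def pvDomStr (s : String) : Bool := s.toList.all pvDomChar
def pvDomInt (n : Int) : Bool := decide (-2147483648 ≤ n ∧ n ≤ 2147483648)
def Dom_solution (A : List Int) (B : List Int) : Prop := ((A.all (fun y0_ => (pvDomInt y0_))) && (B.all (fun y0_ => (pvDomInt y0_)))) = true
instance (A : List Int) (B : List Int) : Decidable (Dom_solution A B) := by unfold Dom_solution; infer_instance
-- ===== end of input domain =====

-- B replaces A's per-element index scan of B with one sweep over a single merged sorted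
-- event stream (each B-value encoded 2v, each A-value 2v+1) and an available-A counter;
-- like A it considers only the len(A) smallest elements of B, and like A it sorts the
-- argument lists in place (the equivalence proved here is about the return value).

-- ===== PORT A =====
-- the inner 'while idx < totalGame: …' loop of A (break → return the updated pair)
def solGo (s1 : Int) (B : List Int) (totalGame : Int) (answer idx : Int) : Int × Int :=
  if _h : idx < totalGame then
    if PySem.List.pyGetD B idx 0 > s1 then (answer + 1, idx + 1)
    else solGo s1 B totalGame answer (idx + 1)
  else (answer, idx)
termination_by (totalGame - idx).toNat
decreasing_by omega

def solution (A : List Int) (B : List Int) : Int :=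
  let A' := PySem.List.sorted A (fun x => x) false
  let B' := PySem.List.sorted B (fun x => x) false
  let totalGame : Int := (A'.length : Int)
  (A'.foldl (fun st s1 => solGo s1 B' totalGame st.1 st.2) (0, 0)).1

-- ===== PORT B =====
def solution_alt (A : List Int) (B : List Int) : Int :=
  let A' := PySem.List.sorted A (fun x => x) false
  let B' := PySem.List.sorted B (fun x => x) false
  let events := (PySem.List.slice B' none (some ((A'.length : Nat) : Int))).map (fun v => 2 * v)
      ++ A'.map (fun v => 2 * v + 1)
  let events' := PySem.List.sorted events (fun x => x) false
  (events'.foldl (fun st e =>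
      if PySem.Int.mod e 2 == 1 then (st.1 + 1, st.2)
      else if st.1 > 0 then (st.1 - 1, st.2 + 1) else st) ((0 : Int), (0 : Int))).2

-- ===== PRECONDITION & SPEC =====
-- A indexes B with a bound of len(A): whenever len(B) < len(A) it raises IndexError,
-- so Pre_ admits exactly the inputs on which A returns.
def Pre_solution (A : List Int) (B : List Int) : Prop := A.length ≤ B.length
instance (A : List Int) (B : List Int) : Decidable (Pre_solution A B) := by unfold Pre_solution; infer_instance
def pvWitness_solution : List Int × List Int := ([1, 2], [1, 3])

def Spec_solution (A : List Int) (B : List Int) (out : Int) : Prop := out = solution_alt A B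
instance (A : List Int) (B : List Int) (out : Int) : Decidable (Spec_solution A B out) := by unfold Spec_solution; infer_instance

-- ===== CLAIM (what is proved, stated in full; the proofs are below) =====
def Claim_equal_solution : Prop := ∀ (A : List Int) (B : List Int), Dom_solution A B → Pre_solution A B → Spec_solution A B (solution A B)

-- ===== LEMMAS AND PROOFS =====

-- the common reference: two-pointer greedy on a pair of lists
def greedy : List Int → List Int → Int
  | [], _ => 0
  | a :: as, bs =>
    match bs.dropWhile (fun b => decide (b ≤ a)) with
    | [] => 0
    | _ :: r => 1 + greedy as r

-- B's sweep, as a recursion over the event list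
def sweepCnt : Int → List Int → Int
  | _, [] => 0
  | av, e :: es =>
    if PySem.Int.mod e 2 == 1 then sweepCnt (av + 1) es
    else if av > 0 then 1 + sweepCnt (av - 1) es else sweepCnt av es

theorem greedy_nil (as : List Int) : greedy as [] = 0 := by
  cases as <;> simp [greedy]

theorem mod2_odd (v : Int) : PySem.Int.mod (2 * v + 1) 2 = 1 := by
  rw [PySem.Int.mod_eq_emod_of_pos (by omega)]; omega

theorem mod2_even (v : Int) : PySem.Int.mod (2 * v) 2 = 0 := by
  rw [PySem.Int.mod_eq_emod_of_pos (by omega)]; omega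

theorem foldB_eq (es : List Int) (av ans : Int) :
    (es.foldl (fun st e =>
      if PySem.Int.mod e 2 == 1 then (st.1 + 1, st.2)
      else if st.1 > 0 then (st.1 - 1, st.2 + 1) else st) (av, ans)).2
    = ans + sweepCnt av es := by
  induction es generalizing av ans with
  | nil => simp [sweepCnt]
  | cons e es ih =>
    simp only [List.foldl_cons, sweepCnt]
    (split_ifs <;> simp_all); omega

theorem sweep_odds (as : List Int) (av : Int) :
    sweepCnt av (as.map (fun a => 2 * a + 1)) = 0 := by
  induction as generalizing av with
  | nil => simp [sweepCnt]
  | cons a as ih => simp [sweepCnt, ih]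

theorem sweep_evens (bs : List Int) (av : Int) (h : 0 ≤ av) :
    sweepCnt av (bs.map (fun b => 2 * b)) = min av (bs.length : Int) := by
  induction bs generalizing av with
  | nil => simp [sweepCnt]; omega
  | cons b bs ih =>
    simp only [List.map_cons, sweepCnt, mod2_even]
    by_cases hav : av > 0
    · rw [if_neg (by simp), if_pos hav, ih (av - 1) (by omega)]
      simp only [List.length_cons]; push_cast; omega
    · rw [if_neg (by simp), if_neg hav, ih av h]
      simp only [List.length_cons]; push_cast; omega

-- the sweep over the merged encoded stream, against the greedy on the two lists
theorem sweep_merge (as bs : List Int) (av : Int) (hav : 0 ≤ av)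
    (has : as.Pairwise (· ≤ ·)) (hbs : bs.Pairwise (· ≤ ·)) :
    sweepCnt av (List.merge (bs.map (fun b => 2 * b)) (as.map (fun a => 2 * a + 1))
        (fun a b => decide (a ≤ b)))
    = if (bs.length : Int) ≤ av then (bs.length : Int)
      else av + greedy as (bs.drop av.toNat) := by
  match as, bs with
  | [], [] => simp [sweepCnt]; omega
  | [], b :: bs =>
    rw [List.map_nil, List.merge_right, sweep_evens _ _ hav]
    simp only [greedy]
    split_ifs <;> omega
  | a :: as, [] =>
    rw [List.map_nil, List.nil_merge, sweep_odds]
    simp [hav]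
  | a :: as, b :: bs =>
    have hmem_bs : ∀ x ∈ bs, b ≤ x := (List.pairwise_cons.mp hbs).1
    by_cases hba : b ≤ a
    · rw [List.map_cons, List.map_cons,
        List.cons_merge_cons_pos _ _ _ (by simp; omega)]
      simp only [sweepCnt, mod2_even]
      rw [if_neg (by simp)]
      rw [show ((2 * a + 1) :: List.map (fun a => 2 * a + 1) as)
            = List.map (fun a => 2 * a + 1) (a :: as) from rfl]
      by_cases hv : av > 0
      · rw [if_pos hv,
          sweep_merge (a :: as) bs (av - 1) (by omega) has (List.pairwise_cons.mp hbs).2]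
        have hdrop : (b :: bs).drop av.toNat = bs.drop (av - 1).toNat := by
          have h1 : av.toNat = (av - 1).toNat + 1 := by omega
          rw [h1, List.drop_succ_cons]
        rw [hdrop]
        generalize greedy (a :: as) (bs.drop (av - 1).toNat) = g
        simp only [List.length_cons]
        split_ifs <;> push_cast <;> omega
      · have hav0 : av = 0 := by omega
        subst hav0
        rw [if_neg hv,
          sweep_merge (a :: as) bs 0 le_rfl has (List.pairwise_cons.mp hbs).2]
        simp only [Int.toNat_zero, List.drop_zero]
        have hg : greedy (a :: as) (b :: bs) = greedy (a :: as) bs := by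
          simp only [greedy]
          rw [List.dropWhile_cons_of_pos (by simpa using hba)]
        cases bs with
        | nil =>
          simp only [List.length_cons, List.length_nil]
          rw [if_pos (by norm_num), if_neg (by norm_num), hg, greedy_nil]
          norm_num
        | cons c cs =>
          simp only [List.length_cons]
          rw [if_neg (by push_cast; omega), if_neg (by push_cast; omega), hg]
    · rw [List.map_cons, List.map_cons,
        List.cons_merge_cons_neg _ _ _ (by simp; omega)]
      simp only [sweepCnt, mod2_odd]
      rw [show (2 * b :: List.map (fun b => 2 * b) bs)
            = List.map (fun b => 2 * b) (b :: bs) from rfl]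
      rw [if_pos (by simp),
        sweep_merge as (b :: bs) (av + 1) (by omega) (List.pairwise_cons.mp has).2 hbs]
      by_cases h1 : ((b :: bs).length : Int) ≤ av
      · rw [if_pos (by omega), if_pos h1]
      · rw [if_neg h1]
        have hlt : av.toNat < (b :: bs).length := by
          simp only [List.length_cons] at h1 ⊢; omega
        have hdr : (b :: bs).drop av.toNat
            = (b :: bs)[av.toNat] :: (b :: bs).drop (av.toNat + 1) :=
          List.drop_eq_getElem_cons hlt
        have hzmem : (b :: bs)[av.toNat] ∈ b :: bs := List.getElem_mem _
        have hbz : b ≤ (b :: bs)[av.toNat] := by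
          rcases List.mem_cons.mp hzmem with h | h
          · rw [h]
          · exact hmem_bs _ h
        have hgz : greedy (a :: as) ((b :: bs).drop av.toNat)
            = 1 + greedy as ((b :: bs).drop (av.toNat + 1)) := by
          rw [hdr]
          simp only [greedy]
          rw [List.dropWhile_cons_of_neg (by simp; omega)]
        rw [hgz]
        have h2 : (av + 1).toNat = av.toNat + 1 := by omega
        by_cases h3 : ((b :: bs).length : Int) ≤ av + 1
        · rw [if_pos h3]
          have hlen : (b :: bs).length = av.toNat + 1 := by
            simp only [List.length_cons] at h1 h3 ⊢; omega
          have hnil : (b :: bs).drop (av.toNat + 1) = [] :=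
            List.drop_eq_nil_of_le (by omega)
          rw [hnil, greedy_nil, hlen]
          push_cast
          omega
        · rw [if_neg h3, h2]
          generalize greedy as ((b :: bs).drop (av.toNat + 1)) = g
          ring
termination_by as.length + bs.length

-- A's inner while loop, characterised on the capped list (bs.take n)
theorem solGo_eq (s1 : Int) (bs : List Int) (n : Nat) (hn : n ≤ bs.length)
    (ans : Int) (idx : Nat) (hidx : idx ≤ n) :
    solGo s1 bs (n : Int) ans (idx : Int) =
      match ((bs.take n).drop idx).dropWhile (fun b => decide (b ≤ s1)) with
      | [] => (ans, (n : Int))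
      | _ :: r => (ans + 1, (n : Int) - r.length) := by
  induction hf : n - idx generalizing idx ans with
  | zero =>
    have hin : idx = n := by omega
    rw [solGo, dif_neg (by omega)]
    have hnil : (bs.take n).drop idx = [] :=
      List.drop_eq_nil_of_le (by simp [List.length_take]; omega)
    rw [hnil, List.dropWhile_nil, hin]
  | succ k ih =>
    have hlt : idx < n := by omega
    rw [solGo, dif_pos (by omega)]
    have hidxlt : idx < bs.length := by omega
    have hget : PySem.List.pyGetD bs (idx : Int) 0 = bs[idx] := by
      rw [PySem.List.pyGetD_natCast]
      exact List.getD_eq_getElem bs 0 hidxlt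
    have hseg : (bs.take n).drop idx = bs[idx] :: (bs.take n).drop (idx + 1) := by
      rw [List.drop_eq_getElem_cons (by simp [List.length_take]; omega)]
      congr 1
      exact List.getElem_take
    rw [hget]
    by_cases hb : bs[idx] > s1
    · rw [if_pos hb, hseg, List.dropWhile_cons_of_neg (by simp; omega)]
      dsimp only
      have hlr : ((bs.take n).drop (idx + 1)).length = n - (idx + 1) := by
        simp only [List.length_drop, List.length_take]
        omega
      rw [hlr]
      refine Prod.ext rfl ?_
      push_cast
      omega
    · rw [if_neg hb]
      have hcast : ((idx : Int) + 1) = ((idx + 1 : Nat) : Int) := by push_cast; ring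
      rw [hcast, ih ans (idx + 1) (by omega) (by omega)]
      rw [hseg, List.dropWhile_cons_of_pos (by simp; omega)]

-- A's outer for loop
theorem foldA_eq (as bs : List Int) (n : Nat) (hn : n ≤ bs.length)
    (ans : Int) (idx : Nat) (hidx : idx ≤ n) :
    (as.foldl (fun st s1 => solGo s1 bs (n : Int) st.1 st.2) (ans, (idx : Int))).1
    = ans + greedy as ((bs.take n).drop idx) := by
  induction as generalizing ans idx with
  | nil => simp [greedy]
  | cons a as ih =>
    rw [List.foldl_cons]
    show (as.foldl _ (solGo a bs (n : Int) ans (idx : Int))).1 = _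
    rw [solGo_eq a bs n hn ans idx hidx]
    cases hdw : ((bs.take n).drop idx).dropWhile (fun b => decide (b ≤ a)) with
    | nil =>
      dsimp only
      rw [ih ans n le_rfl]
      have hnil : (bs.take n).drop n = [] :=
        List.drop_eq_nil_of_le (by simp [List.length_take])
      rw [hnil, greedy_nil]
      simp only [greedy]
      rw [hdw]
    | cons z r =>
      dsimp only
      have hsuf : r <:+ bs.take n :=
        ((List.suffix_cons z r).trans (hdw ▸ List.dropWhile_suffix _)).trans
          (List.drop_suffix idx _)
      obtain ⟨t, ht⟩ := hsuf
      have hlens : t.length + r.length = n := by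
        have := congrArg List.length ht
        simp [List.length_take] at this
        omega
      have hcast : (n : Int) - (r.length : Int) = ((n - r.length : Nat) : Int) := by
        omega
      rw [hcast, ih (ans + 1) (n - r.length) (by omega)]
      have hdrop : (bs.take n).drop (n - r.length) = r := by
        rw [← ht, show n - r.length = t.length from by omega, List.drop_left]
      rw [hdrop]
      simp only [greedy]
      rw [hdw]
      ring

-- ===== VERDICT (by name: the statement is the Claim_ definition above) =====
-- the merged event stream of B is the sorted encoded concatenation
theorem events_sorted (as bsT : List Int)
    (has : as.Pairwise (· ≤ ·)) (hbs : bsT.Pairwise (· ≤ ·)) :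
    PySem.List.sorted
        (bsT.map (fun v => 2 * v) ++ as.map (fun v => 2 * v + 1)) (fun x => x) false
      = List.merge (bsT.map (fun b => 2 * b)) (as.map (fun a => 2 * a + 1))
          (fun a b => decide (a ≤ b)) := by
  apply PySem.List.sorted_id_eq_of_perm_of_pairwise
  · exact List.merge_perm_append _
  · have hp := List.pairwise_merge
      (le := fun a b : Int => decide (a ≤ b))
      (by intro a b c hab hbc; simp at *; omega)
      (by intro a b; simp [le_total])
      (bsT.map (fun b => 2 * b)) (as.map (fun a => 2 * a + 1))
      (by rw [List.pairwise_map]; exact hbs.imp (by intro a b h; simp; omega))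
      (by rw [List.pairwise_map]; exact has.imp (by intro a b h; simp; omega))
    exact hp.imp (by intro a b h; simpa using h)

theorem solution_spec : Claim_equal_solution := by
  intro A B _ hpre
  unfold Spec_solution solution solution_alt
  dsimp only
  have hlenA : (PySem.List.sorted A (fun x => x) false).length = A.length :=
    PySem.List.length_sorted _ _ _
  have hlenB : (PySem.List.sorted B (fun x => x) false).length = B.length :=
    PySem.List.length_sorted _ _ _
  set A' := PySem.List.sorted A (fun x => x) false with hA'
  set B' := PySem.List.sorted B (fun x => x) false with hB'
  have hn : A'.length ≤ B'.length := by rw [hlenA, hlenB]; exact hpre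
  -- A side
  have hAside :
      (A'.foldl (fun st s1 => solGo s1 B' ((A'.length : Nat) : Int) st.1 st.2)
        ((0 : Int), (0 : Int))).1 = greedy A' (B'.take A'.length) := by
    have h0 : ((0 : Int), (0 : Int)) = ((0 : Int), ((0 : Nat) : Int)) := by norm_num
    rw [h0, foldA_eq A' B' A'.length hn 0 0 (by omega), List.drop_zero]
    ring
  -- B side
  have hslice : PySem.List.slice B' none (some ((A'.length : Nat) : Int))
      = B'.take A'.length := PySem.List.slice_to_natCast _ _
  have hasP : A'.Pairwise (· ≤ ·) := by
    have := PySem.List.sorted_pairwise A (fun x => x)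
    simpa using this
  have hbsP : (B'.take A'.length).Pairwise (· ≤ ·) := by
    have hB : B'.Pairwise (· ≤ ·) := by
      have := PySem.List.sorted_pairwise B (fun x => x)
      simpa using this
    exact hB.sublist (List.take_sublist _ _)
  have hBside :
      ((PySem.List.sorted
          ((PySem.List.slice B' none (some ((A'.length : Nat) : Int))).map (fun v => 2 * v)
            ++ A'.map (fun v => 2 * v + 1)) (fun x => x) false).foldl
        (fun st e =>
          if PySem.Int.mod e 2 == 1 then (st.1 + 1, st.2)
          else if st.1 > 0 then (st.1 - 1, st.2 + 1) else st) ((0 : Int), (0 : Int))).2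
      = greedy A' (B'.take A'.length) := by
    rw [hslice, events_sorted A' (B'.take A'.length) hasP hbsP, foldB_eq,
      sweep_merge A' (B'.take A'.length) 0 le_rfl hasP hbsP]
    simp only [Int.toNat_zero, List.drop_zero]
    cases hbt : B'.take A'.length with
    | nil => simp [greedy_nil]
    | cons c cs =>
      rw [if_neg (by simp only [List.length_cons]; push_cast; omega)]
      ring
  rw [hAside]
  exact hBside.symm
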